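-- pv_equiv track=rewrite | github.com/keen-sagar/keen-sagar | Problem Statements/Max_holidays with k obligations.py | max_vacation
-- ===== SOURCE A (Python) =====
-- def max_vacation(n,m,k,d):
--     d.sort()
--     max = 0
--     start = 1
--     for i in range(m-k):
--         end = d[k+i]
--         days = end - start
--         start = d[i]+1
--         if days > max:
--             max = days
--     end = n+1
--     if (end - start) > max:
--             max = end - start
--     return max
-- ===== SOURCE B (Python) =====
-- def max_vacation(n, m, k, d):
--     # Binary search on the answer: the longest free stretch g is the largest value
--     # for which some removal of k obligations leaves g consecutive free days.
--     # (Like A, sorts d in place; return-value equivalent to A.)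
--     d.sort()
--     if k >= m:
--         return max(n, 0)  # every obligation can be skipped
--     a = [0] + d[:m] + [n + 1]
--
--     def feasible(g):
--         # can removing k obligations leave a free stretch of at least g days?
--         return any(a[j + k + 1] - a[j] - 1 >= g for j in range(m - k + 1))
--
--     lo, hi = 0, max(a) - min(a)
--     while lo < hi:
--         mid = (lo + hi + 1) // 2
--         if feasible(mid):
--             lo = mid
--         else:
--             hi = mid - 1
--     return lo
-- ===== Notes on version B (the rewrite author's own statement) =====
-- stated objective: alternative
-- what changed: Replaces A's single-pass running-max loop over obligation windows by a binary search on the answer: the result is found as the largest g for which a linear feasibility predicate (some choice of k removals leaves a free stretch of at least g days) holds.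
-- outside the precondition, e.g. on max_vacation(5, 1, -1, [2, 9]): A returns 8, B returns 0
import Mathlib
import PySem

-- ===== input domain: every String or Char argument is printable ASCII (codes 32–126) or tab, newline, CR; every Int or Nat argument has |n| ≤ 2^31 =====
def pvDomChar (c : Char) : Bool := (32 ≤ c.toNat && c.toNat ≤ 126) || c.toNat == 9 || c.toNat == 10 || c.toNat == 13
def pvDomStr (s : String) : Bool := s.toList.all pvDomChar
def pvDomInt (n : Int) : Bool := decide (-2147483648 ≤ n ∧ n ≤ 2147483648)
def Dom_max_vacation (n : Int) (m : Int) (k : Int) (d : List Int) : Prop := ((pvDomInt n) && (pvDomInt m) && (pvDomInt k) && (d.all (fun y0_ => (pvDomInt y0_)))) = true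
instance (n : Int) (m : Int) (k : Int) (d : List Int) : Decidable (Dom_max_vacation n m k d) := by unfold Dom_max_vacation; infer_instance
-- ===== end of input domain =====

-- B replaces A's running-max loop by a binary search on the answer with a linear
-- feasibility predicate (alternative algorithm, same order of cost).
-- Both A and B sort d in place in Python; the equivalence proved is about the return value.

-- ===== PORT A =====
-- loop body of A's `for i in range(m-k)`; state = (max, start)
def pvAStep (ds : List Int) (k : Int) (st : Int × Int) (i : Int) : Int × Int :=
  let endv := PySem.List.pyGetD ds (k + i) 0   -- d[k+i]; out-of-range (IndexError) excluded by Pre_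
  let days := endv - st.2
  let start' := PySem.List.pyGetD ds i 0 + 1   -- d[i]+1; in range under Pre_
  (if days > st.1 then days else st.1, start')

def max_vacation (n : Int) (m : Int) (k : Int) (d : List Int) : Int :=
  let ds := PySem.List.sorted d (fun x => x) false
  let st := (PySem.List.pyRange 0 (m - k) 1).foldl (pvAStep ds k) (0, 1)
  if n + 1 - st.2 > st.1 then n + 1 - st.2 else st.1

-- ===== PORT B =====
-- B's `feasible(g)`: any() over `range(m - k + 1)`
def pvFeasible (a : List Int) (m : Int) (k : Int) (g : Int) : Bool :=
  (PySem.List.pyRange 0 (m - k + 1) 1).any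
    (fun j => PySem.List.pyGetD a (j + k + 1) 0 - PySem.List.pyGetD a j 0 - 1 ≥ g)

-- B's `while lo < hi` binary-search loop
def pvBSearch (a : List Int) (m : Int) (k : Int) (lo : Int) (hi : Int) : Int :=
  if lo < hi then
    let mid := PySem.Int.floordiv (lo + hi + 1) 2
    if pvFeasible a m k mid then pvBSearch a m k mid hi
    else pvBSearch a m k lo (mid - 1)
  else lo
termination_by (hi - lo).toNat
decreasing_by
  · have h2 := PySem.Int.floordiv_eq_ediv_of_pos (a := lo + hi + 1) (b := 2) (by omega)
    omega
  · have h2 := PySem.Int.floordiv_eq_ediv_of_pos (a := lo + hi + 1) (b := 2) (by omega)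
    omega

def max_vacation_alt (n : Int) (m : Int) (k : Int) (d : List Int) : Int :=
  let ds := PySem.List.sorted d (fun x => x) false
  if k ≥ m then max n 0   -- every obligation can be skipped
  else
    let a := 0 :: PySem.List.slice ds none (some m) ++ [n + 1]
    -- max(a), min(a): a is never empty (it contains 0 and n+1), so .getD 0 is unreachable
    pvBSearch a m k 0
      ((PySem.List.max? a (fun x => x)).getD 0 - (PySem.List.min? a (fun x => x)).getD 0)

-- ===== PRECONDITION & SPEC =====
-- Pre_ excludes negative k (there A either raises IndexError or returns an accidental
-- value via Python's negative-index wraparound) and k < m with m > len(d) (there A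
-- raises IndexError).
def Pre_max_vacation (n : Int) (m : Int) (k : Int) (d : List Int) : Prop :=
  0 ≤ k ∧ (m ≤ k ∨ m ≤ (d.length : Int))
instance (n : Int) (m : Int) (k : Int) (d : List Int) : Decidable (Pre_max_vacation n m k d) := by unfold Pre_max_vacation; infer_instance

def pvWitness_max_vacation : Int × Int × Int × List Int := (10, 3, 1, [2, 9, 5])

def Spec_max_vacation (n : Int) (m : Int) (k : Int) (d : List Int) (out : Int) : Prop := out = max_vacation_alt n m k d
instance (n : Int) (m : Int) (k : Int) (d : List Int) (out : Int) : Decidable (Spec_max_vacation n m k d out) := by unfold Spec_max_vacation; infer_instance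

-- ===== CLAIM (what is proved, stated in full; the proofs are below) =====
def Claim_equal_max_vacation : Prop := ∀ (n : Int) (m : Int) (k : Int) (d : List Int), Dom_max_vacation n m k d → Pre_max_vacation n m k d → Spec_max_vacation n m k d (max_vacation n m k d)

-- ===== LEMMAS AND PROOFS =====

-- the windowed running maximum A's loop computes (proof-side characterisation)
def pvGap (a : List Int) (k : Int) (j : Int) : Int :=
  PySem.List.pyGetD a (j + k + 1) 0 - PySem.List.pyGetD a j 0 - 1

def pvStep (a : List Int) (k : Int) (best : Int) (j : Int) : Int :=
  if pvGap a k j > best then pvGap a k j else best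

-- indexing the padded array a = 0 :: ds.take M ++ [n+1]
lemma pv_a_mid (ds : List Int) (n : Int) (M t : Nat) (hM : M ≤ ds.length) (ht : t < M) :
    PySem.List.pyGetD (0 :: ds.take M ++ [n + 1]) ((t : Int) + 1) 0
      = PySem.List.pyGetD ds (t : Int) 0 := by
  have h1 : ((t : Int) + 1) = ((t + 1 : Nat) : Int) := by push_cast; ring
  rw [h1, PySem.List.pyGetD_natCast, PySem.List.pyGetD_natCast]
  have htlen : t < ds.length := lt_of_lt_of_le ht hM
  have htake : t < (ds.take M).length := by simp [List.length_take]; omega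
  simp [List.getD, List.getElem?_append_left htake, ht, htlen]

lemma pv_a_last (ds : List Int) (n : Int) (M : Nat) (hM : M ≤ ds.length) :
    PySem.List.pyGetD (0 :: ds.take M ++ [n + 1]) ((M : Int) + 1) 0 = n + 1 := by
  have h1 : ((M : Int) + 1) = ((M + 1 : Nat) : Int) := by push_cast; ring
  have hlen : (ds.take M).length = M := by simp [List.length_take]; omega
  rw [h1, PySem.List.pyGetD_natCast]
  simp [List.getD, hlen]

-- the invariant tying A's loop state to the running maximum over the same windows
lemma pv_inv (n m k : Int) (ds : List Int) (hk : 0 ≤ k) (hm : 0 ≤ m)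
    (hml : m ≤ (ds.length : Int)) (j : Nat) (hj : (j : Int) ≤ m - k) :
    (PySem.List.pyRange 0 (j : Int) 1).foldl (pvAStep ds k) (0, 1)
      = ((PySem.List.pyRange 0 (j : Int) 1).foldl
           (pvStep (0 :: ds.take m.toNat ++ [n + 1]) k) 0,
         PySem.List.pyGetD (0 :: ds.take m.toNat ++ [n + 1]) (j : Int) 0 + 1) := by
  induction j with
  | zero =>
      simp [PySem.List.pyRange_one_eq_nil (le_refl (0:Int))]
  | succ j ih =>
      have hj' : (j : Int) ≤ m - k := by push_cast at hj ⊢; omega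
      have hcast : ((j + 1 : Nat) : Int) = (j : Int) + 1 := by push_cast; ring
      have hsplit : PySem.List.pyRange 0 ((j : Int) + 1) 1
          = PySem.List.pyRange 0 (j : Int) 1 ++ [(j : Int)] :=
        PySem.List.pyRange_one_succ_right (by positivity)
      rw [hcast, hsplit, List.foldl_append, List.foldl_append, ih hj',
          List.foldl_cons, List.foldl_nil, List.foldl_cons, List.foldl_nil]
      have hkj : k + (j : Int) = ((k.toNat + j : Nat) : Int) := by omega
      have hkjm : k.toNat + j < m.toNat := by omega
      have hjm : j < m.toNat := by omega
      have hMl : m.toNat ≤ ds.length := by omega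
      have e1 : PySem.List.pyGetD ds (k + (j : Int)) 0
          = PySem.List.pyGetD (0 :: ds.take m.toNat ++ [n + 1]) ((j : Int) + k + 1) 0 := by
        rw [hkj, ← pv_a_mid ds n m.toNat (k.toNat + j) hMl hkjm]
        congr 1
        push_cast; omega
      have e2 : PySem.List.pyGetD ds (j : Int) 0
          = PySem.List.pyGetD (0 :: ds.take m.toNat ++ [n + 1]) ((j : Int) + 1) 0 :=
        (pv_a_mid ds n m.toNat j hMl hjm).symm
      simp only [pvAStep, pvStep, pvGap, e1, e2, sub_add_eq_sub_sub]

-- the running-max fold: lower bounds and attainment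
lemma pv_fold_ge_init (a : List Int) (k : Int) (l : List Int) (b : Int) :
    b ≤ l.foldl (pvStep a k) b := by
  induction l generalizing b with
  | nil => simp
  | cons x t ih =>
      simp only [List.foldl_cons]
      refine le_trans ?_ (ih (pvStep a k b x))
      simp only [pvStep]; split_ifs with h <;> omega

lemma pv_fold_ge_mem (a : List Int) (k : Int) (l : List Int) (b j : Int) (hj : j ∈ l) :
    pvGap a k j ≤ l.foldl (pvStep a k) b := by
  induction l generalizing b with
  | nil => cases hj
  | cons x t ih =>
      simp only [List.foldl_cons]
      rcases List.mem_cons.mp hj with rfl | hj'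
      · refine le_trans ?_ (pv_fold_ge_init a k t (pvStep a k b j))
        simp only [pvStep]; split_ifs with h <;> omega
      · exact ih _ hj'

lemma pv_fold_attained (a : List Int) (k : Int) (l : List Int) (b : Int) :
    l.foldl (pvStep a k) b = b ∨ ∃ j ∈ l, l.foldl (pvStep a k) b = pvGap a k j := by
  induction l generalizing b with
  | nil => left; rfl
  | cons x t ih =>
      simp only [List.foldl_cons]
      rcases ih (pvStep a k b x) with h | ⟨j, hj, hjv⟩
      · rw [h]; simp only [pvStep]
        split_ifs with hx
        · right; exact ⟨x, List.mem_cons_self, rfl⟩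
        · left; rfl
      · right; exact ⟨j, List.mem_cons_of_mem _ hj, hjv⟩

-- an in-range pyGetD value is a member of the list
lemma pv_pyGetD_mem (xs : List Int) (i : Int) (h0 : 0 ≤ i) (h : i < (xs.length : Int)) :
    PySem.List.pyGetD xs i 0 ∈ xs := by
  obtain ⟨t, rfl⟩ := Int.eq_ofNat_of_zero_le h0
  rw [PySem.List.pyGetD_natCast]
  have ht : t < xs.length := by exact_mod_cast h
  rw [List.getD_eq_getElem _ _ ht]
  exact List.getElem_mem ht

-- feasibility ↔ bounded by the fold result (for positive g)
lemma pv_feasible_iff (a : List Int) (m k g : Int) (hg : 1 ≤ g) :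
    pvFeasible a m k g = true ↔
      g ≤ (PySem.List.pyRange 0 (m - k + 1) 1).foldl (pvStep a k) 0 := by
  unfold pvFeasible
  rw [List.any_eq_true]
  constructor
  · rintro ⟨j, hj, hjg⟩
    have := pv_fold_ge_mem a k _ 0 j hj
    simp only [decide_eq_true_eq] at hjg
    unfold pvGap at this
    omega
  · intro hle
    rcases pv_fold_attained a k (PySem.List.pyRange 0 (m - k + 1) 1) 0 with h | ⟨j, hj, hjv⟩
    · omega
    · exact ⟨j, hj, by simp only [decide_eq_true_eq]; unfold pvGap at hjv; omega⟩

-- binary search returns the fold result R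
lemma pv_bsearch_eq (a : List Int) (m k R : Int)
    (hR : R = (PySem.List.pyRange 0 (m - k + 1) 1).foldl (pvStep a k) 0) :
    ∀ N lo hi, (hi - lo).toNat ≤ N → 0 ≤ lo → lo ≤ R → R ≤ hi →
      pvBSearch a m k lo hi = R := by
  intro N
  induction N with
  | zero =>
      intro lo hi hN h0 h1 h2
      rw [pvBSearch, if_neg (by omega)]
      omega
  | succ N ih =>
      intro lo hi hN h0 h1 h2
      rw [pvBSearch]
      by_cases hlt : lo < hi
      · rw [if_pos hlt]
        have hm2 := PySem.Int.floordiv_eq_ediv_of_pos (a := lo + hi + 1) (b := 2) (by omega)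
        set mid := PySem.Int.floordiv (lo + hi + 1) 2 with hmid
        have hb : lo + 1 ≤ mid ∧ mid ≤ hi := by omega
        by_cases hf : pvFeasible a m k mid = true
        · rw [if_pos hf]
          have hle : mid ≤ R := by
            rw [hR]; exact (pv_feasible_iff a m k mid (by omega)).mp hf
          exact ih mid hi (by omega) (by omega) hle h2
        · rw [if_neg hf]
          have hgt : ¬ mid ≤ R := fun hle =>
            hf ((pv_feasible_iff a m k mid (by omega)).mpr (by omega))
          exact ih lo (mid - 1) (by omega) h0 h1 (by omega)
      · rw [if_neg hlt]; omega

theorem max_vacation_spec : Claim_equal_max_vacation := by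
  unfold Claim_equal_max_vacation
  intro n m k d _ hpre
  obtain ⟨hk, hpre2⟩ := hpre
  unfold Spec_max_vacation max_vacation max_vacation_alt
  set ds := PySem.List.sorted d (fun x => x) false with hds
  have hlen : (ds.length : Int) = (d.length : Int) := by
    simp [hds, PySem.List.length_sorted]
  by_cases hkm : k ≥ m
  · -- A's loop is empty and the final window is the whole year; B's base case
    rw [if_pos hkm]
    have hr0 : PySem.List.pyRange 0 (m - k) 1 = [] :=
      PySem.List.pyRange_one_eq_nil (by omega)
    rw [hr0]
    simp only [List.foldl_nil]
    have : n + 1 - 1 = n := by ring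
    rw [this]
    by_cases h : n > 0
    · rw [if_pos (by omega), max_eq_left (by omega)]
    · rw [if_neg (by omega), max_eq_right (by omega)]
  · -- 0 ≤ k < m ≤ len(d): A computes the windowed max R; B's binary search finds R
    rw [if_neg hkm]
    have hm : 0 ≤ m := by omega
    have hml' : m ≤ (ds.length : Int) := by
      rcases hpre2 with h | h
      · omega
      · omega
    have hslice : PySem.List.slice ds none (some m) = ds.take m.toNat :=
      PySem.List.slice_to ds hm
    simp only [hslice]
    set a := (0 : Int) :: ds.take m.toNat ++ [n + 1] with ha
    -- A's value equals the fold R over windows 0 … m-k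
    set R := (PySem.List.pyRange 0 (m - k + 1) 1).foldl (pvStep a k) 0 with hRdef
    have hNk : ((m - k).toNat : Int) = m - k := by omega
    have hinv := pv_inv n m k ds hk hm hml' (m - k).toNat (by omega)
    rw [hNk] at hinv
    have hsplit : PySem.List.pyRange 0 (m - k + 1) 1
        = PySem.List.pyRange 0 (m - k) 1 ++ [m - k] :=
      PySem.List.pyRange_one_succ_right (by omega)
    have hAeqR :
        (if n + 1 - ((PySem.List.pyRange 0 (m - k) 1).foldl (pvAStep ds k) (0, 1)).2
              > ((PySem.List.pyRange 0 (m - k) 1).foldl (pvAStep ds k) (0, 1)).1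
          then n + 1 - ((PySem.List.pyRange 0 (m - k) 1).foldl (pvAStep ds k) (0, 1)).2
          else ((PySem.List.pyRange 0 (m - k) 1).foldl (pvAStep ds k) (0, 1)).1) = R := by
      rw [hinv, hRdef, hsplit, List.foldl_append, List.foldl_cons, List.foldl_nil]
      simp only [pvStep, pvGap]
      have hlast : PySem.List.pyGetD a (m - k + k + 1) 0 = n + 1 := by
        have : m - k + k + 1 = (m.toNat : Int) + 1 := by omega
        rw [this, ha, pv_a_last ds n m.toNat (by omega)]
      rw [hlast]
      have harith : ∀ x : Int, n + 1 - (x + 1) = n + 1 - x - 1 := by intro x; ring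
      rw [harith]
    rw [hAeqR]
    -- the binary-search bounds: 0 ≤ R ≤ max(a) - min(a)
    have hlena : (a.length : Int) = m + 2 := by
      simp [ha, List.length_take]
      omega
    obtain ⟨M, hM⟩ : ∃ M, PySem.List.max? a (fun x => x) = some M := by
      rcases h : PySem.List.max? a (fun x => x) with _ | M
      · exact absurd ((PySem.List.max?_eq_none_iff a (fun x => x)).mp h) (by simp [ha])
      · exact ⟨M, rfl⟩
    obtain ⟨mn, hmn⟩ : ∃ mn, PySem.List.min? a (fun x => x) = some mn := by
      rcases h : PySem.List.min? a (fun x => x) with _ | mn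
      · exact absurd ((PySem.List.min?_eq_none_iff a (fun x => x)).mp h) (by simp [ha])
      · exact ⟨mn, rfl⟩
    have hMmax : ∀ y ∈ a, y ≤ M := PySem.List.max?_isMax hM
    have hmnmin : ∀ y ∈ a, mn ≤ y := PySem.List.min?_isMin hmn
    have hgapb : ∀ j ∈ PySem.List.pyRange 0 (m - k + 1) 1, pvGap a k j ≤ M - mn - 1 := by
      intro j hj
      rw [PySem.List.mem_pyRange_one] at hj
      have h1 : PySem.List.pyGetD a (j + k + 1) 0 ∈ a :=
        pv_pyGetD_mem a _ (by omega) (by omega)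
      have h2 : PySem.List.pyGetD a j 0 ∈ a :=
        pv_pyGetD_mem a _ (by omega) (by omega)
      have := hMmax _ h1
      have := hmnmin _ h2
      unfold pvGap; omega
    have hmnM : mn ≤ M := hMmax mn (PySem.List.min?_mem hmn)
    have hRge0 : 0 ≤ R := by rw [hRdef]; exact pv_fold_ge_init a k _ 0
    have hRub : R ≤ M - mn := by
      rcases pv_fold_attained a k (PySem.List.pyRange 0 (m - k + 1) 1) 0 with h | ⟨j, hj, hjv⟩
      · rw [hRdef, h]; omega
      · have := hgapb j hj
        rw [hRdef, hjv]; omega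
    rw [hM, hmn]
    simp only [Option.getD_some]
    exact (pv_bsearch_eq a m k R hRdef (M - mn - 0).toNat 0 (M - mn)
      (by omega) le_rfl hRge0 hRub).symm
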